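-- pv_equiv track=rewrite | github.com/laviniaraulea/problema3_umtsoft | split_array_problem.py | split_array_average
-- ===== SOURCE A (Python) =====
-- def verifica(lungime_div2, suma, lungime):
--     for i in range(1, lungime_div2 + 1):
--         if suma * i % lungime == 0:
--             return True
--     return False
--
-- def split_array_average(list_A):
--     lungime = len(list_A)
--     lungime_div2 = lungime // 2
--     suma = sum(list_A)
--
--     # conditie necesara pentru a putea imparti vectorul in 2 vectori cu media aritmetica egala
--     if not verifica(lungime_div2, suma, lungime):
--         return False
--
--     # initializare suma_partiala o lista formata din liste (matrice) care pastreaza fiecare suma partiala pana la un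
--     # moment dat, se foloseste set in loc de lista normala pentru a nu retine toate duplicatele astfel reducandu-se
--     # complexitatea de memorie
--     suma_partiala = [set([0]) for _ in range(lungime_div2 + 1)]
--
--     # fiecare rand reprezinta sumele posibile cu i elemente
--     # se merge doar de la lungime/2 pentru ca apoi se repeta in oglinda n1=2 n2=7 si n1=7 n2=2 n1,n2 fiind diviziuni
--     # se folosesc sumele deja calculate la care se adauga doar elementul curent
--     # i merge in ordine inversa pentru a putea adauga fiecare numar in suma cu i elemente fara a strica suma initiala
--     for index in range(len(list_A)):
--         for i in range(lungime_div2, 0, -1):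
--             suma_partiala[i] |= set([t + list_A[index] for t in suma_partiala[i - 1]])
--
--     # se verifica din nou ca diviziunea sa fie valida cu formula (suma*i%lungime) si
--     # cautam valoare optinuta in suma_partiala
--     for i in range(1, lungime_div2+1):
--         if suma * i % lungime == 0 and suma * i // lungime in suma_partiala[i]:
--             return True
--
--     return False
-- ===== SOURCE B (Python) =====
-- # Alternative re-implementation: one dict mapping each reachable subset sum to the
-- # minimal number of elements producing it (capped at half), replacing A's
-- # per-cardinality list of sets.
-- def split_array_average(list_A):
--     n = len(list_A)
--     half = n // 2
--     total = sum(list_A)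
--     if not any(total * i % n == 0 for i in range(1, half + 1)):
--         return False
--     best = {0: 0}
--     for x in list_A:
--         for s, c in list(best.items()):
--             if c < half:
--                 t = s + x
--                 if c + 1 < best.get(t, half + 1):
--                     best[t] = c + 1
--     return any(total * i % n == 0 and best.get(total * i // n, half + 1) <= i
--                for i in range(1, half + 1))
-- ===== Notes on version B (the rewrite author's own statement) =====
-- stated objective: alternative
-- what changed: Replaces A's list of per-cardinality subset-sum sets (each sum re-stored and re-unioned across up to n/2 rows per element) by a single dictionary mapping each reachable subset sum to the minimal number of elements producing it, keeping A's cheap divisibility pre-check.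
import Mathlib
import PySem

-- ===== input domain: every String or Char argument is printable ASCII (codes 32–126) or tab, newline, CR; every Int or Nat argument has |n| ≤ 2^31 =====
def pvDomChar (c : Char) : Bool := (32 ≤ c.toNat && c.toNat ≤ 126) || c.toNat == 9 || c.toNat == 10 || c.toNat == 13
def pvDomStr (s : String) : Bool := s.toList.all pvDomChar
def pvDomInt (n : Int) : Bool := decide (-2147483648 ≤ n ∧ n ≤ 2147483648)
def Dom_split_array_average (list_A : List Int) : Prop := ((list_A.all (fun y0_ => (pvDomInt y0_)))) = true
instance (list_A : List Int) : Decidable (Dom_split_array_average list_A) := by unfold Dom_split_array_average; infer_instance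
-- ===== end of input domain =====

-- B replaces A's list of per-cardinality subset-sum sets by one dictionary mapping each
-- reachable subset sum to the minimal number of elements producing it (objective: alternative).

-- ===== PORT A =====
def verifica (lungime_div2 suma lungime : Int) : Bool :=
  (PySem.List.pyRange 1 (lungime_div2 + 1) 1).any (fun i =>
    PySem.Int.mod (suma * i) lungime == 0)

-- one update 'suma_partiala[i] |= set([t + list_A[index] for t in suma_partiala[i - 1]])'
def rowStep (x : Int) (sp : List (PySem.Set Int)) (i : Int) : List (PySem.Set Int) :=
  PySem.List.pySetD sp i
    (PySem.Set.union (PySem.List.pyGetD sp i PySem.Set.empty)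
      ((PySem.List.pyGetD sp (i - 1) PySem.Set.empty).map (fun t => t + x)))

-- 'for i in range(lungime_div2, 0, -1): …'
def innerA (m x : Int) (sp : List (PySem.Set Int)) : List (PySem.Set Int) :=
  (PySem.List.pyRange m 0 (-1)).foldl (rowStep x) sp

def split_array_average (list_A : List Int) : Bool :=
  let lungime : Int := PySem.List.len list_A
  let lungime_div2 : Int := PySem.Int.floordiv lungime 2
  let suma : Int := list_A.sum
  if verifica lungime_div2 suma lungime = false then false
  else
    let suma_partiala0 : List (PySem.Set Int) :=
      (PySem.List.pyRange 0 (lungime_div2 + 1) 1).map (fun _ => PySem.Set.ofList [0])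
    let suma_partiala :=
      (PySem.List.pyRange 0 lungime 1).foldl
        (fun sp index => innerA lungime_div2 (PySem.List.pyGetD list_A index 0) sp)
        suma_partiala0
    (PySem.List.pyRange 1 (lungime_div2 + 1) 1).any (fun i =>
      PySem.Int.mod (suma * i) lungime == 0 &&
      PySem.Set.contains (PySem.List.pyGetD suma_partiala i PySem.Set.empty)
        (PySem.Int.floordiv (suma * i) lungime))

-- ===== PORT B =====
-- one item (s, c) of the snapshot: 'if c < half: t = s + x; if c+1 < best.get(t, half+1): best[t] = c+1'
def entryStep (half x : Int) (cur : PySem.Dict Int Int) (sc : Int × Int) : PySem.Dict Int Int :=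
  if sc.2 < half then
    if sc.2 + 1 < cur.getD (sc.1 + x) (half + 1) then cur.insert (sc.1 + x) (sc.2 + 1) else cur
  else cur

-- 'for s, c in list(best.items()): …'
def innerB (half x : Int) (best : PySem.Dict Int Int) : PySem.Dict Int Int :=
  best.items.foldl (entryStep half x) best

def split_array_average_alt (list_A : List Int) : Bool :=
  let n : Int := PySem.List.len list_A
  let half : Int := PySem.Int.floordiv n 2
  let total : Int := list_A.sum
  if ((PySem.List.pyRange 1 (half + 1) 1).any (fun i =>
      PySem.Int.mod (total * i) n == 0)) = false then false
  else
    let best : PySem.Dict Int Int :=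
      list_A.foldl (fun best x => innerB half x best) (PySem.Dict.ofList [(0, 0)])
    (PySem.List.pyRange 1 (half + 1) 1).any (fun i =>
      PySem.Int.mod (total * i) n == 0 &&
      decide (best.getD (PySem.Int.floordiv (total * i) n) (half + 1) ≤ i))

-- ===== PRECONDITION & SPEC =====
def Spec_split_array_average (list_A : List Int) (out : Bool) : Prop := out = split_array_average_alt list_A
instance (list_A : List Int) (out : Bool) : Decidable (Spec_split_array_average list_A out) := by unfold Spec_split_array_average; infer_instance

-- ===== CLAIM (what is proved, stated in full; the proofs are below) =====
def Claim_equal_split_array_average : Prop := ∀ (list_A : List Int), Dom_split_array_average list_A → Spec_split_array_average list_A (split_array_average list_A)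

-- ===== LEMMAS AND PROOFS =====

-- A's matrix row j holds a sum v iff B's dictionary knows v with a (nonnegative) minimal count ≤ j.
def MinInv (half : Int) (sp : List (PySem.Set Int)) (best : PySem.Dict Int Int) : Prop :=
  sp.length = half.toNat + 1 ∧ best.keys.Nodup ∧
  (∀ v c : Int, best.get? v = some c → 0 ≤ c) ∧
  (∀ j : Nat, (j : Int) ≤ half → ∀ v : Int,
    (v ∈ sp.getD j PySem.Set.empty ↔ ∃ c : Int, best.get? v = some c ∧ c ≤ (j : Int)))

theorem length_foldl_rowStep (x : Int) (l : List Int) :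
    ∀ sp : List (PySem.Set Int), (l.foldl (rowStep x) sp).length = sp.length := by
  induction l with
  | nil => intro sp; rfl
  | cons i t ih =>
    intro sp
    simp only [List.foldl_cons]
    rw [ih]
    simp [rowStep, PySem.List.length_pySetD]

theorem length_innerA (m x : Int) (sp : List (PySem.Set Int)) :
    (innerA m x sp).length = sp.length :=
  length_foldl_rowStep x _ sp

theorem innerA_getD (x : Int) (m : Nat) :
    ∀ (sp : List (PySem.Set Int)), m < sp.length → ∀ j : Nat,
    (innerA (m : Int) x sp).getD j PySem.Set.empty =
      if 1 ≤ j ∧ j ≤ m then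
        PySem.Set.union (sp.getD j PySem.Set.empty)
          ((sp.getD (j - 1) PySem.Set.empty).map (fun t => t + x))
      else sp.getD j PySem.Set.empty := by
  induction m with
  | zero =>
    intro sp _ j
    rw [if_neg (by omega)]
    unfold innerA
    rw [PySem.List.pyRange_neg_one_eq_nil (by norm_num), List.foldl_nil]
  | succ m ih =>
    intro sp h j
    unfold innerA
    rw [PySem.List.pyRange_neg_one_cons (by exact_mod_cast Nat.succ_pos m)]
    simp only [List.foldl_cons]
    have hc : ((m + 1 : Nat) : Int) - 1 = ((m : Nat) : Int) := by push_cast; ring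
    rw [hc]
    have hrow : rowStep x sp ((m + 1 : Nat) : Int) =
        sp.set (m + 1) (PySem.Set.union (sp.getD (m + 1) PySem.Set.empty)
          ((sp.getD m PySem.Set.empty).map (fun t => t + x))) := by
      unfold rowStep
      rw [hc, PySem.List.pyGetD_natCast, PySem.List.pyGetD_natCast, PySem.List.pySetD_natCast]
    rw [hrow]
    have hih := ih (sp.set (m + 1) (PySem.Set.union (sp.getD (m + 1) PySem.Set.empty)
          ((sp.getD m PySem.Set.empty).map (fun t => t + x)))) (by simpa using (by omega : m < sp.length)) j
    rw [show (List.foldl (rowStep x)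
        (sp.set (m + 1) (PySem.Set.union (sp.getD (m + 1) PySem.Set.empty)
          ((sp.getD m PySem.Set.empty).map (fun t => t + x))))
        (PySem.List.pyRange (m : Int) 0 (-1))) = innerA (m : Int) x
        (sp.set (m + 1) (PySem.Set.union (sp.getD (m + 1) PySem.Set.empty)
          ((sp.getD m PySem.Set.empty).map (fun t => t + x)))) from rfl]
    rw [hih]
    have hset_ne : ∀ k : Nat, k ≠ m + 1 →
        (sp.set (m + 1) (PySem.Set.union (sp.getD (m + 1) PySem.Set.empty)
          ((sp.getD m PySem.Set.empty).map (fun t => t + x)))).getD k PySem.Set.empty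
        = sp.getD k PySem.Set.empty := by
      intro k hk
      rw [List.getD_eq_getElem?_getD, List.getElem?_set, if_neg (by omega),
        ← List.getD_eq_getElem?_getD]
    have hset_eq :
        (sp.set (m + 1) (PySem.Set.union (sp.getD (m + 1) PySem.Set.empty)
          ((sp.getD m PySem.Set.empty).map (fun t => t + x)))).getD (m + 1) PySem.Set.empty
        = PySem.Set.union (sp.getD (m + 1) PySem.Set.empty)
          ((sp.getD m PySem.Set.empty).map (fun t => t + x)) := by
      rw [List.getD_eq_getElem?_getD, List.getElem?_set, if_pos rfl, if_pos h]
      rfl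
    by_cases hj : j = m + 1
    · subst hj
      rw [if_neg (by omega), hset_eq, if_pos (by omega)]
      have : m + 1 - 1 = m := by omega
      rw [this]
    · by_cases hj2 : 1 ≤ j ∧ j ≤ m
      · rw [if_pos hj2, if_pos (by omega), hset_ne j (by omega), hset_ne (j - 1) (by omega)]
      · rw [if_neg hj2, if_neg (by omega), hset_ne j hj]

theorem foldl_entryStep_frame (half x : Int) (l : List (Int × Int)) :
    ∀ (cur : PySem.Dict Int Int) (v : Int), (∀ p ∈ l, p.1 + x ≠ v) →
    (l.foldl (entryStep half x) cur).get? v = cur.get? v := by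
  induction l with
  | nil => intro cur v _; rfl
  | cons p t ih =>
    intro cur v h
    simp only [List.foldl_cons]
    rw [ih _ _ (fun q hq => h q (List.mem_cons_of_mem _ hq))]
    have hne : v ≠ p.1 + x := (h p (List.mem_cons_self)).symm
    unfold entryStep
    split_ifs with h1 h2
    · exact PySem.Dict.get?_insert_of_ne _ _ hne
    · rfl
    · rfl

theorem entryStep_get?_of_ne (half x : Int) (cur : PySem.Dict Int Int) (p : Int × Int) (v : Int)
    (hne : p.1 + x ≠ v) : (entryStep half x cur p).get? v = cur.get? v := by
  unfold entryStep
  split_ifs with h1 h2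
  · exact PySem.Dict.get?_insert_of_ne _ _ (Ne.symm hne)
  · rfl
  · rfl

theorem foldl_entryStep_hit (half x : Int) (l : List (Int × Int)) :
    ∀ (cur : PySem.Dict Int Int) (v c : Int), (l.map Prod.fst).Nodup → (v - x, c) ∈ l →
    (l.foldl (entryStep half x) cur).get? v =
      if c < half ∧ c + 1 < cur.getD v (half + 1) then some (c + 1) else cur.get? v := by
  induction l with
  | nil => intro cur v c _ hmem; simp at hmem
  | cons p t ih =>
    intro cur v c hnd hmem
    simp only [List.map_cons, List.nodup_cons] at hnd
    by_cases hp : p = (v - x, c)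
    · subst hp
      simp only [List.foldl_cons]
      have hframe : ∀ q ∈ t, q.1 + x ≠ v := by
        intro q hq hqe
        refine hnd.1 ?_
        have hq1 : q.1 = v - x := by omega
        exact List.mem_map.mpr ⟨q, hq, hq1⟩
      rw [foldl_entryStep_frame half x t _ v hframe]
      have hvx : v - x + x = v := by ring
      by_cases h1 : c < half <;> by_cases h2 : c + 1 < cur.getD v (half + 1) <;>
        simp [entryStep, hvx, h1, h2, PySem.Dict.get?_insert_self]
    · have hmemt : (v - x, c) ∈ t := by
        rcases List.mem_cons.mp hmem with h | h
        · exact absurd h.symm hp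
        · exact h
      have hkey : p.1 ≠ v - x := by
        intro he
        exact hnd.1 (List.mem_map.mpr ⟨(v - x, c), hmemt, he.symm⟩)
      have hne : p.1 + x ≠ v := by omega
      have hstep_get : (entryStep half x cur p).get? v = cur.get? v :=
        entryStep_get?_of_ne half x cur p v hne
      have hstep_getD : (entryStep half x cur p).getD v (half + 1) = cur.getD v (half + 1) := by
        rw [PySem.Dict.getD_eq_get?_getD, hstep_get, ← PySem.Dict.getD_eq_get?_getD]
      simp only [List.foldl_cons]
      rw [ih _ _ _ hnd.2 hmemt, hstep_getD, hstep_get]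

theorem innerB_get?_none (half x : Int) (best : PySem.Dict Int Int) (v : Int)
    (hvx : best.get? (v - x) = none) :
    (innerB half x best).get? v = best.get? v := by
  have hnk : v - x ∉ best.keys := (PySem.Dict.get?_eq_none_iff_not_mem_keys best _).mp hvx
  refine foldl_entryStep_frame half x best.items best v ?_
  intro p hp he
  refine hnk ?_
  have h1 : p.1 = v - x := by omega
  rw [← h1]
  exact PySem.Dict.mem_keys_of_mem_items best hp

theorem innerB_get?_some (half x : Int) (best : PySem.Dict Int Int) (hnd : best.keys.Nodup)
    (v c : Int) (hvx : best.get? (v - x) = some c) :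
    (innerB half x best).get? v =
      if c < half ∧ c + 1 < best.getD v (half + 1) then some (c + 1) else best.get? v := by
  have hmem : (v - x, c) ∈ best.items := PySem.Dict.mem_items_of_get?_eq_some best hvx
  have hnd' : (best.items.map Prod.fst).Nodup := by
    simpa [PySem.Dict.keys] using hnd
  exact foldl_entryStep_hit half x best.items best v c hnd' hmem

theorem nodup_keys_foldl_entryStep (half x : Int) (l : List (Int × Int)) :
    ∀ cur : PySem.Dict Int Int, cur.keys.Nodup → (l.foldl (entryStep half x) cur).keys.Nodup := by
  induction l with
  | nil => intro cur h; exact h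
  | cons p t ih =>
    intro cur h
    simp only [List.foldl_cons]
    apply ih
    unfold entryStep
    split_ifs
    · exact PySem.Dict.nodup_keys_insert _ _ _ h
    · exact h
    · exact h

theorem nodup_keys_innerB (half x : Int) (best : PySem.Dict Int Int) (hnd : best.keys.Nodup) :
    (innerB half x best).keys.Nodup :=
  nodup_keys_foldl_entryStep half x best.items best hnd

theorem minInv_step (half : Int) (hh : 0 ≤ half) (x : Int) (sp : List (PySem.Set Int))
    (best : PySem.Dict Int Int) (h : MinInv half sp best) :
    MinInv half (innerA half x sp) (innerB half x best) := by
  obtain ⟨hlen, hnd, hpos, hbi⟩ := h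
  have hm : ((half.toNat : Nat) : Int) = half := Int.toNat_of_nonneg hh
  have hlt : half.toNat < sp.length := by omega
  refine ⟨by rw [length_innerA]; exact hlen, nodup_keys_innerB half x best hnd, ?_, ?_⟩
  · intro v c hc
    rcases hvx : best.get? (v - x) with _ | c0
    · rw [innerB_get?_none half x best v hvx] at hc
      exact hpos v c hc
    · rw [innerB_get?_some half x best hnd v c0 hvx] at hc
      split_ifs at hc with hcond
      · have h0 := hpos (v - x) c0 hvx
        injection hc with hc'
        omega
      · exact hpos v c hc
  · intro j hj v
    have hA := innerA_getD x half.toNat sp hlt j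
    rw [hm] at hA
    rw [hA]
    by_cases hj1 : 1 ≤ j ∧ j ≤ half.toNat
    · rw [if_pos hj1]
      have hmem : v ∈ PySem.Set.union (sp.getD j PySem.Set.empty)
          ((sp.getD (j - 1) PySem.Set.empty).map (fun t => t + x)) ↔
          v ∈ sp.getD j PySem.Set.empty ∨ (v - x) ∈ sp.getD (j - 1) PySem.Set.empty := by
        rw [PySem.Set.mem_union]
        constructor
        · rintro (hu | hu)
          · exact Or.inl hu
          · obtain ⟨t, ht, hte⟩ := List.mem_map.mp hu
            have : v - x = t := by omega
            exact Or.inr (this ▸ ht)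
        · rintro (hu | hu)
          · exact Or.inl hu
          · exact Or.inr (List.mem_map.mpr ⟨v - x, hu, by ring⟩)
      rw [hmem, hbi j (by omega) v, hbi (j - 1) (by omega) (v - x)]
      have hj1' : ((j - 1 : Nat) : Int) = (j : Int) - 1 := by omega
      rcases hvx : best.get? (v - x) with _ | c0
      · rw [innerB_get?_none half x best v hvx]
        constructor
        · rintro (hu | ⟨c2, hc2, _⟩)
          · exact hu
          · cases hc2
        · exact Or.inl
      · rw [innerB_get?_some half x best hnd v c0 hvx]
        by_cases hcond : c0 < half ∧ c0 + 1 < best.getD v (half + 1)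
        · rw [if_pos hcond]
          constructor
          · rintro (⟨c2, hc2, hle⟩ | ⟨c2, hc2, hle⟩)
            · refine ⟨c0 + 1, rfl, ?_⟩
              have hgd : best.getD v (half + 1) = c2 := by
                rw [PySem.Dict.getD_eq_get?_getD, hc2]; rfl
              omega
            · injection hc2 with hc2'
              exact ⟨c0 + 1, rfl, by omega⟩
          · rintro ⟨c2, hc2, hle⟩
            injection hc2 with hc2'
            exact Or.inr ⟨c0, rfl, by omega⟩
        · rw [if_neg hcond]
          constructor
          · rintro (hu | ⟨c2, hc2, hle⟩)
            · exact hu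
            · injection hc2 with hc2'
              subst hc2'
              have hc0h : c0 < half := by omega
              have hgd : best.getD v (half + 1) ≤ c0 + 1 := by
                by_contra hgt
                exact hcond ⟨hc0h, by omega⟩
              rcases hv2 : best.get? v with _ | c3
              · rw [PySem.Dict.getD_eq_get?_getD, hv2] at hgd
                simp only [Option.getD_none] at hgd
                omega
              · refine ⟨c3, rfl, ?_⟩
                rw [PySem.Dict.getD_eq_get?_getD, hv2] at hgd
                simp only [Option.getD_some] at hgd
                omega
          · exact Or.inl
    · rw [if_neg hj1]
      have hj0 : j = 0 := by omega
      subst hj0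
      rw [hbi 0 (by omega) v]
      rcases hvx : best.get? (v - x) with _ | c0
      · rw [innerB_get?_none half x best v hvx]
      · rw [innerB_get?_some half x best hnd v c0 hvx]
        by_cases hcond : c0 < half ∧ c0 + 1 < best.getD v (half + 1)
        · rw [if_pos hcond]
          have hpos0 := hpos (v - x) c0 hvx
          constructor
          · rintro ⟨c2, hc2, hle⟩
            have h02 := hpos v c2 hc2
            have hgd : best.getD v (half + 1) = c2 := by
              rw [PySem.Dict.getD_eq_get?_getD, hc2]; rfl
            exfalso; omega
          · rintro ⟨c2, hc2, hle⟩
            injection hc2 with hc2'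
            exfalso; omega
        · rw [if_neg hcond]

theorem minInv_foldl (half : Int) (hh : 0 ≤ half) (l : List Int) :
    ∀ (sp : List (PySem.Set Int)) (best : PySem.Dict Int Int), MinInv half sp best →
      MinInv half (l.foldl (fun sp x => innerA half x sp) sp)
        (l.foldl (fun b x => innerB half x b) best) := by
  induction l with
  | nil => intro sp best h; exact h
  | cons y t ih =>
    intro sp best h
    simp only [List.foldl_cons]
    exact ih _ _ (minInv_step half hh y sp best h)

theorem minInv_init (half : Int) (hh : 0 ≤ half) :
    MinInv half ((PySem.List.pyRange 0 (half + 1) 1).map (fun _ => PySem.Set.ofList [0]))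
      (PySem.Dict.ofList [(0, 0)]) := by
  have h00 : PySem.Dict.ofList [((0 : Int), (0 : Int))] = PySem.Dict.mk [(0, 0)] := by decide
  refine ⟨?_, PySem.Dict.nodup_keys_ofList _, ?_, ?_⟩
  · rw [List.length_map, PySem.List.length_pyRange_one]; omega
  · intro v c hc
    rw [h00, PySem.Dict.get?_mk_cons] at hc
    split_ifs at hc with h0
    · injection hc with hc'; omega
    · rw [show (PySem.Dict.mk ([] : List (Int × Int))).get? v = none from rfl] at hc
      cases hc
  · intro j hj v
    have hjl : j < half.toNat + 1 := by omega
    rw [List.getD_eq_getElem?_getD,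
      show half + 1 = ((half.toNat + 1 : Nat) : Int) by omega,
      PySem.List.getElem?_map_pyRange_zero (fun _ => PySem.Set.ofList [0]) (half.toNat + 1) j hjl]
    simp only [Option.getD_some]
    rw [show PySem.Set.ofList [(0 : Int)] = [0] from by decide, h00]
    constructor
    · intro hv
      have hv0 : v = 0 := by simpa using hv
      subst hv0
      exact ⟨0, by rw [PySem.Dict.get?_mk_cons]; simp, by positivity⟩
    · rintro ⟨c, hc, _⟩
      rw [PySem.Dict.get?_mk_cons] at hc
      split_ifs at hc with h0
      · have h0' : (0 : Int) = v := by simpa using h0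
        rw [← h0']
        exact List.mem_singleton.mpr rfl
      · rw [show (PySem.Dict.mk ([] : List (Int × Int))).get? v = none from rfl] at hc
        cases hc

-- ===== VERDICT (by name: the statement is the Claim_ definition above) =====
theorem split_array_average_spec : Claim_equal_split_array_average := by
  intro list_A _
  show split_array_average list_A = split_array_average_alt list_A
  simp only [split_array_average, split_array_average_alt]
  have hh : 0 ≤ PySem.Int.floordiv (PySem.List.len list_A) 2 := by
    rw [PySem.Int.floordiv_eq_ediv_of_pos (by norm_num), PySem.List.len_eq]
    exact Int.ediv_nonneg (Int.natCast_nonneg _) (by norm_num)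
  rw [PySem.List.foldl_pyRange_pyGetD list_A 0
    (fun sp x => innerA (PySem.Int.floordiv (PySem.List.len list_A) 2) x sp) _ (le_refl 0)]
  rw [show (Int.toNat 0) = 0 from rfl, List.drop_zero]
  have hInv := minInv_foldl (PySem.Int.floordiv (PySem.List.len list_A) 2) hh list_A _ _
    (minInv_init (PySem.Int.floordiv (PySem.List.len list_A) 2) hh)
  obtain ⟨hlen, hndF, hposF, hbiF⟩ := hInv
  by_cases hv : verifica (PySem.Int.floordiv (PySem.List.len list_A) 2) list_A.sum
      (PySem.List.len list_A) = false
  · have hvB : ((PySem.List.pyRange 1 (PySem.Int.floordiv (PySem.List.len list_A) 2 + 1) 1).any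
        (fun i => PySem.Int.mod (list_A.sum * i) (PySem.List.len list_A) == 0)) = false := hv
    rw [if_pos hv, if_pos hvB]
  · have hvB : ¬ ((PySem.List.pyRange 1 (PySem.Int.floordiv (PySem.List.len list_A) 2 + 1) 1).any
        (fun i => PySem.Int.mod (list_A.sum * i) (PySem.List.len list_A) == 0)) = false := hv
    rw [if_neg hv, if_neg hvB]
    apply PySem.List.any_congr_mem
    intro i hi
    obtain ⟨h1i, h2i⟩ := PySem.List.mem_pyRange_one.mp hi
    obtain ⟨k, rfl⟩ : ∃ k : Nat, i = (k : Int) := ⟨i.toNat, (Int.toNat_of_nonneg (by omega)).symm⟩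
    cases hmod : (PySem.Int.mod (list_A.sum * (k : Int)) (PySem.List.len list_A) == 0) with
    | false => simp only [Bool.false_and]
    | true =>
      simp only [Bool.true_and]
      rw [PySem.List.pyGetD_natCast]
      rw [Bool.eq_iff_iff, PySem.Set.contains_iff, decide_eq_true_eq]
      rw [hbiF k (by omega) (PySem.Int.floordiv (list_A.sum * (k : Int)) (PySem.List.len list_A))]
      rw [PySem.Dict.getD_eq_get?_getD]
      rcases hg : (list_A.foldl (fun b x =>
          innerB (PySem.Int.floordiv (PySem.List.len list_A) 2) x b)
          (PySem.Dict.ofList [(0, 0)])).get?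
          (PySem.Int.floordiv (list_A.sum * (k : Int)) (PySem.List.len list_A)) with _ | c
      · simp only [Option.getD_none]
        constructor
        · rintro ⟨c, hc, _⟩; cases hc
        · intro habs; exfalso; omega
      · simp only [Option.getD_some]
        constructor
        · rintro ⟨c2, hc2, hle⟩
          injection hc2 with hc2'
          omega
        · intro hle; exact ⟨c, rfl, hle⟩
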